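-- pv_equiv track=rewrite | github.com/psmoros/AutomatedInference | Model.py | compute_naive_extension
-- ===== SOURCE A (Python) =====
-- def compute_naive_extension(cfs):
--     naive = []
--     maxLen = 0
--
--     for i in cfs:
--         if len(i)>maxLen:
--             maxLen = len(i)
--
--     for i in cfs:
--         if len(i)==maxLen:
--             naive.append(i)
--
--     return set(naive)
-- ===== SOURCE B (Python) =====
-- def compute_naive_extension(cfs):
--     buckets = {}
--     for i in cfs:
--         buckets.setdefault(len(i), []).append(i)
--     if not buckets:
--         return set()
--     return set(buckets[max(buckets)])
-- ===== Notes on version B (the rewrite author's own statement) =====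
-- stated objective: alternative
-- what changed: B builds a length-indexed bucket dict in one pass and returns the set of the maximum-length bucket, instead of A's two full scans (running max, then filter) followed by set().
import Mathlib
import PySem

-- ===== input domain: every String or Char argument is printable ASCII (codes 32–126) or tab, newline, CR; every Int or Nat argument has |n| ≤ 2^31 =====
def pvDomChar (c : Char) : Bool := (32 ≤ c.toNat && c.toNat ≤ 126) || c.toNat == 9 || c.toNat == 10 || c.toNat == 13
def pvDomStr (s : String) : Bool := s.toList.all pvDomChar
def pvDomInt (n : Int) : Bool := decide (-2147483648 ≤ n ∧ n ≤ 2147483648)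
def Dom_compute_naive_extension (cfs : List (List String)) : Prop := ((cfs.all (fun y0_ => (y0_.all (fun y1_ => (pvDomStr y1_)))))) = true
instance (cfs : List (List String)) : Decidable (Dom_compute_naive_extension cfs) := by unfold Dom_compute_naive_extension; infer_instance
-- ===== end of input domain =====

-- B groups the collections into a length-indexed bucket dict in one pass and returns the set
-- of the maximum-length bucket, instead of A's two scans (running max, then filter).

-- ===== PORT A =====
def compute_naive_extension (cfs : List (List String)) : List (List String) :=
  let maxLen : Int := cfs.foldl (fun m i => if (i.length : Int) > m then (i.length : Int) else m) 0
  let naive : List (List String) :=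
    cfs.foldl (fun acc i => if (i.length : Int) == maxLen then acc ++ [i] else acc) []
  PySem.Set.ofList naive

-- ===== PORT B =====
def compute_naive_extension_alt (cfs : List (List String)) : List (List String) :=
  let buckets : PySem.Dict Int (List (List String)) :=
    cfs.foldl (fun d i => d.modify (i.length : Int) [] (· ++ [i])) PySem.Dict.empty
  match PySem.List.max? (PySem.Dict.keys buckets) (fun k => k) with
  | none => []   -- empty dict: Python B returns set()
  | some m => PySem.Set.ofList (buckets.getD m [])

-- ===== PRECONDITION & SPEC =====
def Spec_compute_naive_extension (cfs : List (List String)) (out : List (List String)) : Prop :=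
  out = compute_naive_extension_alt cfs
instance (cfs : List (List String)) (out : List (List String)) : Decidable (Spec_compute_naive_extension cfs out) := by
  unfold Spec_compute_naive_extension; infer_instance

-- ===== CLAIM (what is proved, stated in full; the proofs are below) =====
def Claim_equal_compute_naive_extension : Prop :=
  ∀ (cfs : List (List String)), Dom_compute_naive_extension cfs →
    Spec_compute_naive_extension cfs (compute_naive_extension cfs)

-- ===== LEMMAS AND PROOFS =====

-- A's running-max step is just `max`.
theorem pvStepMax :
    (fun (m : Int) (i : List String) => if (i.length : Int) > m then (i.length : Int) else m)
      = fun (m : Int) (i : List String) => max m (i.length : Int) := by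
  funext m i
  by_cases h : (i.length : Int) > m
  · simp [h, max_eq_right (le_of_lt h)]
  · simp [h, max_eq_left (not_lt.mp h)]

-- The heart of the equivalence: A's value equals B's value on every input.
theorem pvMain (cfs : List (List String)) :
    compute_naive_extension cfs = compute_naive_extension_alt cfs := by
  cases cfs with
  | nil => rfl
  | cons c cs =>
    simp only [compute_naive_extension, compute_naive_extension_alt]
    set L : List (List String) := c :: cs with hL
    set f : List String → Int := fun i => (i.length : Int) with hf
    set M : Int := L.foldl (fun m i => if (i.length : Int) > m then (i.length : Int) else m) 0 with hM
    -- M is the maximum of the lengths (all ≥ 0, init 0), and it is attained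
    have hMfold : M = (L.map f).foldl max 0 := by
      rw [hM, pvStepMax, List.foldl_map]
    have hub : ∀ y ∈ L.map f, y ≤ M := by
      rw [hMfold]; exact (PySem.List.le_foldl_max (L.map f) 0).2
    have hmem : M ∈ L.map f := by
      rcases PySem.List.foldl_max_mem (L.map f) 0 with h0 | h
      · -- running max stayed 0: the head length is ≤ 0 and ≥ 0, so it equals M
        have hc : f c ∈ L.map f := by simp [hL]
        have h1 : f c ≤ M := hub _ hc
        have h2 : (0 : Int) ≤ f c := by simp [hf]
        have : f c = M := le_antisymm h1 (by rw [hMfold, h0] at *; omega)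
        rw [← this]; exact hc
      · rw [hMfold]; exact h
    -- B's bucket keys are the distinct lengths
    have hkeys : (L.foldl (fun d i => d.modify (i.length : Int) [] (· ++ [i]))
        (PySem.Dict.empty : PySem.Dict Int (List (List String)))).keys
          = PySem.Set.ofList (L.map f) := by
      rw [PySem.Dict.keys_foldl_modify_key]
      rfl
    -- max(buckets) = M
    have hne : M ∈ PySem.Set.ofList (L.map f) := (PySem.Set.mem_ofList _ _).mpr hmem
    obtain ⟨v, hv⟩ : ∃ v, PySem.List.max? (PySem.Set.ofList (L.map f)) (fun k => k) = some v := by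
      cases hvv : PySem.List.max? (PySem.Set.ofList (L.map f)) (fun k => k) with
      | none =>
        rw [PySem.List.max?_eq_none_iff] at hvv
        rw [hvv] at hne; cases hne
      | some v => exact ⟨v, rfl⟩
    have hvM : v = M := by
      have h1 : v ∈ L.map f := (PySem.Set.mem_ofList _ _).mp (PySem.List.max?_mem hv)
      have h2 : M ≤ v := PySem.List.max?_isMax hv M hne
      exact le_antisymm (hub _ h1) h2
    -- the bucket at M is exactly A's filtered list
    have hbucket : (L.foldl (fun d i => d.modify (i.length : Int) [] (· ++ [i]))
        (PySem.Dict.empty : PySem.Dict Int (List (List String)))).getD M []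
          = L.filter (fun i => (i.length : Int) == M) := by
      have hmap : L.foldl (fun d i => d.modify (i.length : Int) [] (· ++ [i]))
          (PySem.Dict.empty : PySem.Dict Int (List (List String)))
            = (L.map (fun i => ((i.length : Int), i))).foldl
                (fun d p => d.modify p.1 [] (· ++ [p.2])) PySem.Dict.empty := by
        rw [List.foldl_map]
      rw [hmap, PySem.Dict.getD_foldl_modify_append, List.filter_map, List.map_map]
      simp [Function.comp_def]
    -- assemble
    rw [PySem.List.foldl_append_if_eq_filter, hkeys, hv, hvM]
    dsimp only
    rw [hbucket]
    simp

-- ===== VERDICT (by name: the statement is the Claim_ definition above) =====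
theorem compute_naive_extension_spec : Claim_equal_compute_naive_extension := by
  intro cfs _
  unfold Spec_compute_naive_extension
  exact pvMain cfs
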